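-- pv_equiv track=rewrite | github.com/liuliqiu/study | Euler/part1/p49.py | f
-- ===== SOURCE A (Python) =====
-- def f(s):
--     if len(s)==1:
--         return [s[0]]
--     else:
--         v=[]
--         for i in range(len(s)):
--             for j in f(s[:i]+s[i+1:]):
--                 v.append(s[i]*10**(len(s)-1)+j)
--         return v
-- ===== SOURCE B (Python) =====
-- def f(s):
--     # Iterative breadth-first expansion instead of A's recursion: each state is
--     # (number built so far via Horner, remaining unused elements).
--     if not s:
--         return []
--     states = [(0, s)]
--     for _ in range(len(s)):
--         states = [(n * 10 + rem[k], rem[:k] + rem[k + 1:])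
--                   for (n, rem) in states for k in range(len(rem))]
--     return [n for (n, _) in states]
-- ===== Notes on version B (the rewrite author's own statement) =====
-- stated objective: alternative
-- what changed: Replaces A's recursion (which weights each chosen element by an explicit power of 10) with an iterative worklist of (Horner-accumulated number, remaining elements) states expanded level by level; no recursion and no power computation.
import Mathlib
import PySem

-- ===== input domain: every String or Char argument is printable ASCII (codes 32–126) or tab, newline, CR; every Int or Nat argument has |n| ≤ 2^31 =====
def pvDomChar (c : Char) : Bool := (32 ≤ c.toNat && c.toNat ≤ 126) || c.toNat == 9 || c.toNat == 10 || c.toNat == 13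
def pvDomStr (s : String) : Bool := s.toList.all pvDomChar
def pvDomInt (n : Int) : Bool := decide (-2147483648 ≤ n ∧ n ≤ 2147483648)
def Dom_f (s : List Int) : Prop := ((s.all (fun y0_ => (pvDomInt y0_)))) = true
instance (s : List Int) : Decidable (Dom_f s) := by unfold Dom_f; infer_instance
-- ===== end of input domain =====

-- B replaces A's recursion by an iterative worklist of (Horner number, remaining) states; same values, same order.

-- ===== PORT A =====
-- literal port of A: recursion over the element removed at each position,
-- weighting it by 10^(len-1); slices s[:i]+s[i+1:] via PySem.List.slice,
-- s[i] via pyGetD (i is drawn from range(len(s)), hence always in range).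
def f (s : List Int) : List Int :=
  if s.length = 1 then
    [PySem.List.pyGetD s 0 0]
  else
    (List.range s.length).attach.foldl (fun v i =>
      (f (PySem.List.slice s none (some (i.1 : Int)) ++
          PySem.List.slice s (some ((i.1 : Int) + 1)) none)).foldl
        (fun v j => v ++ [PySem.List.pyGetD s (i.1 : Int) 0 * 10 ^ (s.length - 1) + j]) v)
      []
termination_by s.length
decreasing_by
  have hi : i.1 < s.length := List.mem_range.mp i.2
  have h1 : (i.1 : Int) + 1 = ((i.1 + 1 : Nat) : Int) := by push_cast; ring
  rw [PySem.List.slice_to_natCast, h1, PySem.List.slice_from_natCast]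
  simp only [List.length_append, List.length_take, List.length_drop]
  omega

-- ===== PORT B =====
-- literal port of Source B: iterative expansion of (number, remaining) states.
-- rem[k] → getD (k drawn from range(len(rem)), in range), rem[:k]+rem[k+1:] → take/drop (exact for 0 ≤ k).
def f_alt (s : List Int) : List Int :=
  if s = [] then []
  else
    (((List.range s.length).foldl (fun states _ =>
        states.flatMap (fun st =>
          (List.range st.2.length).map (fun k =>
            (st.1 * 10 + st.2.getD k 0, st.2.take k ++ st.2.drop (k + 1)))))
      [(0, s)]).map (fun st => st.1))

-- ===== PRECONDITION & SPEC =====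
def Spec_f (s : List Int) (out : List Int) : Prop := out = f_alt s
instance (s : List Int) (out : List Int) : Decidable (Spec_f s out) := by unfold Spec_f; infer_instance

-- ===== CLAIM (what is proved, stated in full; the proofs are below) =====
def Claim_equal_f : Prop := ∀ (s : List Int), Dom_f s → Spec_f s (f s)

-- ===== LEMMAS AND PROOFS =====

-- the "rest after removing index i" list
def pvRest (s : List Int) (i : Nat) : List Int := s.take i ++ s.drop (i + 1)

theorem pvRest_length {s : List Int} {i : Nat} (h : i < s.length) :
    (pvRest s i).length = s.length - 1 := by
  simp only [pvRest, List.length_append, List.length_take, List.length_drop]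
  omega

-- common spec: all index-selection sequences, Horner-accumulated from `a`
def pvG (a : Int) (s : List Int) : List Int :=
  if s = [] then [a]
  else (List.range s.length).attach.flatMap (fun i =>
    pvG (a * 10 + s.getD i.1 0) (pvRest s i.1))
termination_by s.length
decreasing_by
  have hi : i.1 < s.length := List.mem_range.mp i.2
  have := pvRest_length (s := s) hi
  omega

theorem pvG_nil (a : Int) : pvG a [] = [a] := by rw [pvG]; simp

theorem pvG_ne_nil (a : Int) {s : List Int} (h : s ≠ []) :
    pvG a s = (List.range s.length).attach.flatMap (fun i =>
      pvG (a * 10 + s.getD i.1 0) (pvRest s i.1)) := by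
  rw [pvG]; simp [h]

-- shift lemma: pvG a s = map (a * 10^|s| + ·) (pvG 0 s)
theorem pvG_shift (a : Int) (s : List Int) :
    pvG a s = (pvG 0 s).map (fun j => a * 10 ^ s.length + j) := by
  by_cases h : s = []
  · subst h; simp [pvG_nil]
  · rw [pvG_ne_nil a h, pvG_ne_nil 0 h, List.map_flatMap]
    refine List.flatMap_congr ?_
    intro i hi
    have hlt : i.1 < s.length := List.mem_range.mp i.2
    have hr := pvRest_length (s := s) hlt
    rw [pvG_shift (a * 10 + s.getD i.1 0) (pvRest s i.1),
        pvG_shift (0 * 10 + s.getD i.1 0) (pvRest s i.1), List.map_map]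
    refine List.map_congr_left ?_
    intro j _
    simp only [Function.comp_apply, hr]
    have hp : (10 : Int) ^ s.length = 10 ^ (s.length - 1) * 10 := by
      rw [← pow_succ]
      congr 1
      have : 0 < s.length := List.length_pos_of_ne_nil h
      omega
    rw [hp]
    ring
termination_by s.length
decreasing_by
  all_goals
    have hlt : i.1 < s.length := List.mem_range.mp i.2
    have := pvRest_length (s := s) hlt
    omega

-- A's recursion equals pvG 0 on nonempty input
theorem f_eq_pvG {s : List Int} (h : s ≠ []) : f s = pvG 0 s := by
  by_cases h1 : s.length = 1
  · match s, h1 with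
    | [x], _ =>
      rw [f, pvG]
      simp [PySem.List.pyGetD_zero_cons, pvRest, pvG_nil]
  · rw [f]
    simp only [h1, if_false]
    rw [pvG_ne_nil 0 h]
    have hbody : ∀ (v : List Int) (i : {x // x ∈ List.range s.length}),
        (f (PySem.List.slice s none (some (i.1 : Int)) ++
            PySem.List.slice s (some ((i.1 : Int) + 1)) none)).foldl
          (fun v j => v ++ [PySem.List.pyGetD s (i.1 : Int) 0 * 10 ^ (s.length - 1) + j]) v
        = v ++ pvG (0 * 10 + s.getD i.1 0) (pvRest s i.1) := by
      intro v i
      have hlt : i.1 < s.length := List.mem_range.mp i.2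
      have h1' : (i.1 : Int) + 1 = ((i.1 + 1 : Nat) : Int) := by push_cast; ring
      rw [PySem.List.slice_to_natCast, h1', PySem.List.slice_from_natCast,
          PySem.List.foldl_append_singleton_eq_map]
      congr 1
      have hrest : s.take i.1 ++ s.drop (i.1 + 1) = pvRest s i.1 := rfl
      rw [hrest]
      have hne : pvRest s i.1 ≠ [] := by
        have := pvRest_length (s := s) hlt
        intro hc
        rw [hc] at this
        simp at this
        omega
      rw [f_eq_pvG hne, pvG_shift (0 * 10 + s.getD i.1 0) (pvRest s i.1),
          pvRest_length (s := s) hlt]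
      refine List.map_congr_left ?_
      intro j _
      rw [PySem.List.pyGetD_natCast]
      ring
    rw [List.foldl_ext _ (fun v i => v ++ pvG (0 * 10 + s.getD i.1 0) (pvRest s i.1)) _
          (fun v i _ => hbody v i),
        PySem.List.foldl_append_eq_flatMap]
    simp
termination_by s.length
decreasing_by
  have hlt : i.1 < s.length := List.mem_range.mp i.2
  have := pvRest_length (s := s) hlt
  omega

-- B's expansion step
def pvStep (L : List (Int × List Int)) : List (Int × List Int) :=
  L.flatMap (fun st =>
    (List.range st.2.length).map (fun k =>
      (st.1 * 10 + st.2.getD k 0, st.2.take k ++ st.2.drop (k + 1))))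

def pvIter (t : Nat) (L : List (Int × List Int)) : List (Int × List Int) :=
  match t with
  | 0 => L
  | t + 1 => pvIter t (pvStep L)

theorem pvStep_append (L₁ L₂ : List (Int × List Int)) :
    pvStep (L₁ ++ L₂) = pvStep L₁ ++ pvStep L₂ := by
  simp [pvStep]

theorem pvIter_append (t : Nat) (L₁ L₂ : List (Int × List Int)) :
    pvIter t (L₁ ++ L₂) = pvIter t L₁ ++ pvIter t L₂ := by
  induction t generalizing L₁ L₂ with
  | zero => rfl
  | succ t ih => simp [pvIter, pvStep_append, ih]

theorem pvIter_nil (t : Nat) : pvIter t [] = [] := by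
  induction t with
  | zero => rfl
  | succ t ih => simp [pvIter, pvStep, ih]

theorem map_eq_flatMap_singleton {α β : Type} (l : List α) (g : α → β) :
    l.map g = l.flatMap (fun x => [g x]) := by
  induction l with
  | nil => rfl
  | cons a l ih => simp [ih]

theorem pvIter_flatMap {α : Type} (t : Nat) (l : List α) (F : α → List (Int × List Int)) :
    pvIter t (l.flatMap F) = l.flatMap (fun x => pvIter t (F x)) := by
  induction l with
  | nil => simp [pvIter_nil]
  | cons a l ih => rw [List.flatMap_cons, List.flatMap_cons, pvIter_append, ih]

-- running B's loop to completion on one state yields pvG paired with []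
theorem pvIter_singleton (n : Nat) : ∀ (rem : List Int) (a : Int), rem.length = n →
    pvIter n [(a, rem)] = (pvG a rem).map (fun j => (j, ([] : List Int))) := by
  induction n with
  | zero =>
    intro rem a h
    have : rem = [] := List.eq_nil_of_length_eq_zero h
    subst this
    simp [pvIter, pvG_nil]
  | succ n ih =>
    intro rem a h
    have hne : rem ≠ [] := by intro hc; subst hc; simp at h
    show pvIter n (pvStep [(a, rem)]) = _
    have hstep : pvStep [(a, rem)] =
        (List.range rem.length).flatMap (fun k =>
          [(a * 10 + rem.getD k 0, pvRest rem k)]) := by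
      rw [← map_eq_flatMap_singleton]
      simp [pvStep, pvRest]
    rw [hstep, pvIter_flatMap, pvG_ne_nil a hne]
    have hattach : (List.range rem.length).attach.flatMap (fun i =>
        pvG (a * 10 + rem.getD i.1 0) (pvRest rem i.1))
        = (List.range rem.length).flatMap (fun k =>
            pvG (a * 10 + rem.getD k 0) (pvRest rem k)) := by
      simp [List.flatMap_def]
    rw [hattach, List.map_flatMap]
    refine List.flatMap_congr ?_
    intro k hk
    have hlt : k < rem.length := List.mem_range.mp hk
    have hr : (pvRest rem k).length = n := by
      have := pvRest_length (s := rem) hlt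
      omega
    rw [ih (pvRest rem k) (a * 10 + rem.getD k 0) hr]

theorem f_alt_eq_pvG {s : List Int} (h : s ≠ []) : f_alt s = pvG 0 s := by
  have hfold : ∀ (m : Nat) (L : List (Int × List Int)),
      (List.range m).foldl (fun states _ => pvStep states) L = pvIter m L := by
    intro m
    induction m with
    | zero => intro L; rfl
    | succ m ih =>
      intro L
      rw [List.range_succ_eq_map]
      simp only [List.foldl_cons, List.foldl_map]
      exact ih (pvStep L)
  unfold f_alt
  simp only [h, if_false]
  have hbody : ((List.range s.length).foldl (fun states _ =>
      states.flatMap (fun st =>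
        (List.range st.2.length).map (fun k =>
          (st.1 * 10 + st.2.getD k 0, st.2.take k ++ st.2.drop (k + 1)))))
      [(0, s)]) = pvIter s.length [(0, s)] := hfold s.length [(0, s)]
  rw [hbody, pvIter_singleton s.length s 0 rfl, List.map_map]
  show List.map ((fun st => st.1) ∘ fun j => (j, ([] : List Int))) (pvG 0 s) = pvG 0 s
  exact List.map_id _ ▸ rfl

-- ===== VERDICT (by name: the statement is the Claim_ definition above) =====
theorem f_spec : Claim_equal_f := by
  intro s _
  unfold Spec_f
  by_cases h : s = []
  · subst h
    rw [f, f_alt]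
    simp
  · rw [f_eq_pvG h, f_alt_eq_pvG h]
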